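-- pv_equiv track=rewrite | github.com/giliaann/scripting-languages-lab | lab2/search/longest_non_repeating_initials_sentence.py | has_two_words_with_same_initial
-- ===== SOURCE A (Python) =====
-- def split_first_word(sentence):
--     word = ""
--     remainder = ""
--     i = 0
--     while i < len(sentence):
--         c = sentence[i]
--         if c.isalpha():
--             word += c
--         #ommit first whitespaces
--         elif len(word) != 0:
--             break
--         i += 1
--
--     remainder = sentence[i:]
--
--     return word, remainder
--
-- def has_two_words_with_same_initial(sentence: str) -> bool:
--     """
--     Checks if the string contains two consecutive words starting with the same letter.
--     """
--     last_first_letter = ''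
--
--     word, rest = split_first_word(sentence)
--     while word:
--         if word[0] == last_first_letter:
--             return True
--         last_first_letter = word[0]
--         word, rest = split_first_word(rest)
--     return False
-- ===== SOURCE B (Python) =====
-- def has_two_words_with_same_initial(sentence: str) -> bool:
--     """Single linear scan: at each alpha-run start, compare its initial with the previous run's."""
--     prev = ''
--     in_word = False
--     for c in sentence:
--         if c.isalpha():
--             if not in_word:
--                 if c == prev:
--                     return True
--                 prev = c
--                 in_word = True
--         else:
--             in_word = False
--     return False
-- ===== Notes on version B (the rewrite author's own statement) =====
-- stated objective: faster
-- what changed: Replaces the repeated split-first-word re-scanning of the remainder with a single character-level scan that tracks the previous word's initial and an in-word flag.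
import Mathlib
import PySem

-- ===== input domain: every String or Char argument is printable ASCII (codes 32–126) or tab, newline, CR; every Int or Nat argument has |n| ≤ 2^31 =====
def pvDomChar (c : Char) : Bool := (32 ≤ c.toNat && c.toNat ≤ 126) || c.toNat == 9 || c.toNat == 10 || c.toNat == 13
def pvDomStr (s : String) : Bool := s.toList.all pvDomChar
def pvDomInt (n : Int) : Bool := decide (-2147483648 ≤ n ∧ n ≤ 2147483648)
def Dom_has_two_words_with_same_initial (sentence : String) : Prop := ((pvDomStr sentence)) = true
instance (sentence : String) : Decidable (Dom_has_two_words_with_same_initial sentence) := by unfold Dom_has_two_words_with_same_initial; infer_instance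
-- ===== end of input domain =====

-- B replaces A's quadratic repeated split_first_word re-scan by one linear scan
-- tracking the previous word's initial (objective: faster, asymptotic).

-- ===== PORT A =====
-- split_first_word's while loop: `word` accumulates alpha chars, breaks at the first
-- non-alpha after the word started; returns (word, sentence[i:]).
def pvSplitFirstWord (word : List Char) (s : List Char) : List Char × List Char :=
  match s with
  | [] => (word, [])
  | c :: cs =>
    if PySem.Chars.isalpha c then pvSplitFirstWord (word ++ [c]) cs
    else if word.length ≠ 0 then (word, c :: cs)
    else pvSplitFirstWord word cs

-- `last_first_letter` starts as '' in Python; since word[0] is always one char,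
-- '' vs a one-char string is rendered exactly by Option Char (none = '').
theorem pvSplit_len (s : List Char) : ∀ w, ((pvSplitFirstWord w s).2).length ≤ s.length ∧
    ((pvSplitFirstWord w s).1 ≠ w → ((pvSplitFirstWord w s).2).length < s.length) := by
  induction s with
  | nil => intro w; simp [pvSplitFirstWord]
  | cons c cs ih =>
    intro w
    simp only [pvSplitFirstWord]
    split
    · rcases ih (w ++ [c]) with ⟨h1, _⟩
      refine ⟨by simpa using Nat.le_succ_of_le h1, fun _ => by simpa using Nat.lt_succ_of_le h1⟩
    · split
      · simp
      · rcases ih w with ⟨h1, h2⟩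
        exact ⟨by simpa using Nat.le_succ_of_le h1, fun h => by simpa using Nat.lt_succ_of_le h1⟩

def pvLoopA (last : Option Char) (s : List Char) : Bool :=
  match h : pvSplitFirstWord [] s with
  | ([], _) => false
  | (c :: _, rest) =>
    if some c == last then true
    else pvLoopA (some c) rest
termination_by s.length
decreasing_by
  have := (pvSplit_len s []).2 (by simp [h])
  simpa [h] using this

def has_two_words_with_same_initial (sentence : String) : Bool :=
  pvLoopA none sentence.toList

-- ===== PORT B =====
-- one pass: `prev` = previous word's initial (none = Python ''), `inw` = inside a word
def pvLoopB (prev : Option Char) (inw : Bool) (s : List Char) : Bool :=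
  match s with
  | [] => false
  | c :: cs =>
    if PySem.Chars.isalpha c then
      if !inw then
        if some c == prev then true
        else pvLoopB (some c) true cs
      else pvLoopB prev true cs
    else pvLoopB prev false cs

def has_two_words_with_same_initial_alt (sentence : String) : Bool :=
  pvLoopB none false sentence.toList

-- ===== PRECONDITION & SPEC =====
def Spec_has_two_words_with_same_initial (sentence : String) (out : Bool) : Prop := out = has_two_words_with_same_initial_alt sentence
instance (sentence : String) (out : Bool) : Decidable (Spec_has_two_words_with_same_initial sentence out) := by unfold Spec_has_two_words_with_same_initial; infer_instance

-- ===== CLAIM (what is proved, stated in full; the proofs are below) =====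
def Claim_equal_has_two_words_with_same_initial : Prop := ∀ (sentence : String), Dom_has_two_words_with_same_initial sentence → Spec_has_two_words_with_same_initial sentence (has_two_words_with_same_initial sentence)

-- ===== LEMMAS AND PROOFS =====

-- split_first_word with a nonempty accumulated word takes exactly the alpha run
theorem pvSplit_nonempty (s : List Char) : ∀ w, w ≠ [] →
    pvSplitFirstWord w s = (w ++ s.takeWhile PySem.Chars.isalpha, s.dropWhile PySem.Chars.isalpha) := by
  induction s with
  | nil => intro w _; simp [pvSplitFirstWord]
  | cons c cs ih =>
    intro w hw
    simp only [pvSplitFirstWord]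
    by_cases hc : PySem.Chars.isalpha c
    · rw [if_pos hc, ih (w ++ [c]) (by simp)]
      simp [List.takeWhile_cons, List.dropWhile_cons, hc]
    · rw [if_neg hc, if_pos (by simpa using hw)]
      simp [List.takeWhile_cons, List.dropWhile_cons, hc]

-- once inside a word, B skips the rest of the alpha run
theorem pvLoopB_inword (s : List Char) : ∀ p,
    pvLoopB p true s = pvLoopB p false (s.dropWhile PySem.Chars.isalpha) := by
  induction s with
  | nil => intro p; simp [pvLoopB]
  | cons c cs ih =>
    intro p
    by_cases hc : PySem.Chars.isalpha c
    · simpa [pvLoopB, hc] using ih p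
    · simp [pvLoopB, hc]

theorem pvLoop_eq (n : ℕ) : ∀ (s : List Char), s.length ≤ n → ∀ p,
    pvLoopA p s = pvLoopB p false s := by
  induction n with
  | zero =>
    intro s hs p
    have : s = [] := List.eq_nil_of_length_eq_zero (Nat.le_zero.mp hs)
    subst this; simp [pvLoopA, pvLoopB, pvSplitFirstWord]
  | succ n ih =>
    intro s hs p
    match s with
    | [] => simp [pvLoopA, pvLoopB, pvSplitFirstWord]
    | c :: cs =>
      by_cases hc : PySem.Chars.isalpha c
      · have hsplit : pvSplitFirstWord [] (c :: cs) =
            (c :: cs.takeWhile PySem.Chars.isalpha, cs.dropWhile PySem.Chars.isalpha) := by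
          simpa [pvSplitFirstWord, hc] using pvSplit_nonempty cs [c] (by simp)
        rw [pvLoopA, hsplit]
        simp only [pvLoopB, hc, if_pos, Bool.not_false]
        by_cases hp : (some c == p) = true
        · simp [hp]
        · simp only [hp, if_false, Bool.false_eq_true]
          rw [pvLoopB_inword]
          exact ih _ (Nat.le_trans (List.length_dropWhile_le _ _) (Nat.le_of_succ_le_succ hs)) (some c)
      · have : pvSplitFirstWord [] (c :: cs) = pvSplitFirstWord [] cs := by
          simp [pvSplitFirstWord, hc]
        conv_lhs => rw [pvLoopA]
        rw [this, ← pvLoopA]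
        simp only [pvLoopB, hc, if_false, Bool.false_eq_true]
        exact ih cs (Nat.le_of_succ_le_succ hs) p

-- ===== VERDICT (by name: the statement is the Claim_ definition above) =====
theorem has_two_words_with_same_initial_spec : Claim_equal_has_two_words_with_same_initial := by
  intro sentence _
  unfold Spec_has_two_words_with_same_initial has_two_words_with_same_initial has_two_words_with_same_initial_alt
  exact pvLoop_eq sentence.toList.length sentence.toList (Nat.le_refl _) none
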